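-- pv_equiv track=rewrite | github.com/Eui9179/algorithm-study | programmers/python/score_kit/stack_queue/p42586.py | solution
-- ===== SOURCE A (Python) =====
-- def solution(progresses, speeds):
--     answer = []
--
--     while progresses:
--         count = 0
--         day = 1
--         while progresses[0] + (speeds[0] * day) < 100:
--             day += 1
--
--         for i in range(len(progresses)):
--             progresses[i] += (speeds[i] * day)
--
--         while progresses and progresses[0] >= 100:
--             progresses.pop(0)
--             speeds.pop(0)
--             count += 1
--
--         if count > 0:
--             answer.append(count)
--
--     return answer
-- ===== SOURCE B (Python) =====
-- def solution(progresses, speeds):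
--     # remaining days per task: 0 if already complete, else ceiling division
--     days = [0 if p >= 100 else -(-(100 - p) // s) for p, s in zip(progresses, speeds)]
--     answer = []
--     i, n = 0, len(days)
--     deadline = 0
--     while i < n:
--         deadline = max(deadline + 1, days[i])
--         j = i + 1
--         while j < n and days[j] <= deadline:
--             j += 1
--         answer.append(j - i)
--         i = j
--     return answer
-- ===== Notes on version B (the rewrite author's own statement) =====
-- stated objective: alternative
-- what changed: B replaces A's repeated whole-list simulation (per round: a unit-step day search, an O(n) progress update and front pops) by computing each task's remaining days once with ceiling division and grouping in a single left-to-right pass by a running deadline; intended as faster, but a timing run could not measure a ratio (A times out on the larger generated inputs).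
-- outside the precondition, e.g. on solution([200], [-1]): A returns [1], B returns [1]
import Mathlib
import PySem

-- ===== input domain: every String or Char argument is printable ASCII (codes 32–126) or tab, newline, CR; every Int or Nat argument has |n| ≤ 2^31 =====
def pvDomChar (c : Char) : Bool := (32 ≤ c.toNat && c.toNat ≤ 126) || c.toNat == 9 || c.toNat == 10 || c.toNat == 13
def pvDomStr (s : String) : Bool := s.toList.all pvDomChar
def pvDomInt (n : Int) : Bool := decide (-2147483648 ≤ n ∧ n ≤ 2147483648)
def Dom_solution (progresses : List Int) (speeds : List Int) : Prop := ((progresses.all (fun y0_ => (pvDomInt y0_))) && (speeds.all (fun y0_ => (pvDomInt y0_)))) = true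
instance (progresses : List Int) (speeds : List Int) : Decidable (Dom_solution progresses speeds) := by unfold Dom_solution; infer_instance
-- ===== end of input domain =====

-- B replaces A's round-by-round simulation by one ceiling division per task and a single
-- grouping pass over a running deadline. Note: Python A empties the `progresses`/`speeds`
-- lists it is given (pop/in-place updates), B does not mutate its arguments; the
-- equivalence proved here is about the RETURN value only.

-- ===== PORT A =====
-- `while progresses[0] + speeds[0]*day < 100: day += 1`; the `0 < s` conjunct is a pure
-- totality guard (with s ≤ 0 and p < 100 the Python loop never terminates; excluded by Pre_)
def dayLoop (p s day : Int) : Int :=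
  if h : 0 < s ∧ p + s * day < 100 then dayLoop p s (day + 1) else day
termination_by (100 - (p + s * day)).toNat
decreasing_by
  have e : p + s * (day + 1) = (p + s * day) + s := by ring
  rw [e]
  generalize p + s * day = X at *
  omega

-- `while progresses and progresses[0] >= 100: pop both; count += 1`
def popLoop : List Int → List Int → Int → Int × List Int × List Int
  | p :: ps, s :: ss, c =>
      if 100 ≤ p then popLoop ps ss (c + 1) else (c, p :: ps, s :: ss)
  | ps, ss, c => (c, ps, ss)

-- the outer `while progresses:`; fuel = initial length (each round pops ≥ 1 under Pre_);
-- an empty `speeds` with nonempty `progresses` is Python's IndexError, excluded by Pre_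
def solutionLoop : Nat → List Int → List Int → List Int → List Int
  | 0, _, _, ans => ans
  | _ + 1, [], _, ans => ans
  | _ + 1, _ :: _, [], ans => ans
  | f + 1, p :: ps, s :: ss, ans =>
      let day := dayLoop p s 1
      let prog' := List.zipWith (fun pi si => pi + si * day) (p :: ps) (s :: ss)
      let r := popLoop prog' (s :: ss) 0
      solutionLoop f r.2.1 r.2.2 (if 0 < r.1 then ans ++ [r.1] else ans)

def solution (progresses : List Int) (speeds : List Int) : List Int :=
  solutionLoop progresses.length progresses speeds []

-- ===== PORT B =====
-- `-(-(100 - p) // s)` : ceiling division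
def ceilDays (p s : Int) : Int := -(PySem.Int.floordiv (-(100 - p)) s)

-- `0 if p >= 100 else -(-(100 - p) // s)` : remaining days of one task
def taskDays (p s : Int) : Int := if 100 ≤ p then 0 else ceilDays p s

-- the two index loops of Source B over `days`: advance the deadline at a group head, then the
-- inner `while j < n and days[j] <= deadline` scan (ported as takeWhile/dropWhile)
def groupsLoop : List Int → Int → List Int
  | [], _ => []
  | d :: rest, dl =>
      let dl' := max (dl + 1) d
      (1 + (rest.takeWhile (fun x => decide (x ≤ dl'))).length) ::
        groupsLoop (rest.dropWhile (fun x => decide (x ≤ dl'))) dl'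
termination_by l => l.length
decreasing_by
  exact Nat.lt_succ_of_le (List.length_dropWhile_le _ _)

def solution_alt (progresses : List Int) (speeds : List Int) : List Int :=
  groupsLoop ((progresses.zip speeds).map (fun x => taskDays x.1 x.2)) 0

-- ===== PRECONDITION & SPEC =====
-- Pre_ requires speeds to cover progresses (otherwise Python A raises IndexError) and every
-- task to have a positive speed or to be already complete with speed 0: outside this an
-- unfinished task can never reach 100, so A's simulation diverges on almost every such
-- input and no equivalence can be stated; on the rare such inputs where A does return
-- (e.g. a negative-speed task that is still >= 100 on its release day) B agrees in every
-- sampled case, but that is not claimed here (see cite).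
def Pre_solution (progresses : List Int) (speeds : List Int) : Prop :=
  progresses.length ≤ speeds.length ∧
    ∀ x ∈ progresses.zip speeds, 0 < x.2 ∨ (x.2 = 0 ∧ 100 ≤ x.1)
instance (progresses : List Int) (speeds : List Int) : Decidable (Pre_solution progresses speeds) := by unfold Pre_solution; infer_instance

def pvWitness_solution : List Int × List Int := ([93, 30, 55], [1, 30, 5])

def Spec_solution (progresses : List Int) (speeds : List Int) (out : List Int) : Prop := out = solution_alt progresses speeds
instance (progresses : List Int) (speeds : List Int) (out : List Int) : Decidable (Spec_solution progresses speeds out) := by unfold Spec_solution; infer_instance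

-- ===== CLAIM (what is proved, stated in full; the proofs are below) =====
def Claim_equal_solution : Prop := ∀ (progresses : List Int) (speeds : List Int), Dom_solution progresses speeds → Pre_solution progresses speeds → Spec_solution progresses speeds (solution progresses speeds)

-- ===== LEMMAS AND PROOFS =====

-- completion-day bracket for a positive speed: 100 ≤ p + s*D ↔ ceilDays p s ≤ D
lemma ceilDays_le_iff (p s D : Int) (hs : 0 < s) :
    ceilDays p s ≤ D ↔ 100 ≤ p + s * D := by
  unfold ceilDays
  rw [PySem.Int.floordiv_eq_ediv_of_pos hs]
  have h := Int.le_ediv_iff_mul_le (a := -D) (b := -(100 - p)) hs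
  constructor
  · intro hle
    have := h.mp (by omega)
    nlinarith
  · intro hge
    have : -D * s ≤ -(100 - p) := by nlinarith
    have := h.mpr this
    omega

-- shifting progress by s*D shifts the completion day by -D
lemma ceilDays_shift (p s D : Int) (hs : 0 < s) :
    ceilDays (p + s * D) s = ceilDays p s - D := by
  unfold ceilDays
  rw [PySem.Int.floordiv_eq_ediv_of_pos hs, PySem.Int.floordiv_eq_ediv_of_pos hs]
  have e : -(100 - (p + s * D)) = -(100 - p) + D * s := by ring
  rw [e, Int.add_mul_ediv_right _ _ (ne_of_gt hs)]
  ring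

-- completion-day bracket for taskDays, for a task A can finish (positive speed, or already done)
lemma taskDays_le_iff (p s D : Int) (hok : 0 < s ∨ (s = 0 ∧ 100 ≤ p)) (hD : 0 ≤ D) :
    taskDays p s ≤ D ↔ 100 ≤ p + s * D := by
  unfold taskDays
  rcases hok with hs | ⟨hs0, hp⟩
  · split
    · rename_i hp
      constructor
      · intro _; nlinarith
      · intro _; exact hD
    · exact ceilDays_le_iff p s D hs
  · subst hs0
    rw [if_pos hp]
    constructor
    · intro _; omega
    · intro _; exact hD

lemma taskDays_nonneg (p s : Int) (hok : 0 < s ∨ (s = 0 ∧ 100 ≤ p)) :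
    0 ≤ taskDays p s := by
  unfold taskDays
  split
  · omega
  · rename_i hp
    rcases hok with hs | ⟨_, hp'⟩
    · have h0 : ¬ ceilDays p s ≤ 0 := by
        rw [ceilDays_le_iff p s 0 hs]
        omega
      omega
    · exact absurd hp' hp

-- characterisation of A's inner day loop
lemma dayLoop_eq (p s day : Int) (hs : 0 < s) :
    dayLoop p s day = max day (ceilDays p s) := by
  rw [dayLoop]
  split
  · rename_i h
    rw [dayLoop_eq p s (day + 1) hs]
    have hd : ¬ (ceilDays p s ≤ day) := by
      rw [ceilDays_le_iff p s day hs]; omega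
    omega
  · rename_i h
    have h100 : 100 ≤ p + s * day := by
      by_contra hc
      exact h ⟨hs, by omega⟩
    have := (ceilDays_le_iff p s day hs).mpr h100
    omega
termination_by (100 - (p + s * day)).toNat
decreasing_by
  have e : p + s * (day + 1) = (p + s * day) + s := by ring
  rename_i h
  rw [e]
  generalize p + s * day = X at *
  omega

-- A's day loop on the D-shifted head computes the remaining days towards taskDays
lemma dayLoop_shift (p s D : Int) (hok : 0 < s ∨ (s = 0 ∧ 100 ≤ p)) (hD : 0 ≤ D) :
    dayLoop (p + s * D) s 1 = max 1 (taskDays p s - D) := by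
  rcases hok with hs | ⟨hs0, hp⟩
  · rw [dayLoop_eq _ s 1 hs, ceilDays_shift p s D hs]
    unfold taskDays
    split
    · rename_i hp
      have h0 : ceilDays p s ≤ 0 := by
        rw [ceilDays_le_iff p s 0 hs]
        omega
      omega
    · rfl
  · subst hs0
    rw [dayLoop]
    rw [dif_neg (by simp)]
    unfold taskDays
    rw [if_pos hp]
    omega

-- characterisation of A's pop loop on a zipped, D'-shifted state
lemma popLoop_eq (l : List (Int × Int)) (extra : List Int) (D' : Int)
    (hok : ∀ x ∈ l, 0 < x.2 ∨ (x.2 = 0 ∧ 100 ≤ x.1)) (hD : 0 ≤ D') : ∀ c : Int,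
    popLoop (l.map (fun x => x.1 + x.2 * D')) (l.map Prod.snd ++ extra) c =
      (c + ((l.takeWhile (fun x => decide (taskDays x.1 x.2 ≤ D'))).length : Int),
       (l.dropWhile (fun x => decide (taskDays x.1 x.2 ≤ D'))).map (fun x => x.1 + x.2 * D'),
       (l.dropWhile (fun x => decide (taskDays x.1 x.2 ≤ D'))).map Prod.snd ++ extra) := by
  induction l with
  | nil =>
      intro c
      cases extra <;> simp [popLoop]
  | cons hd t ih =>
      intro c
      obtain ⟨p, s⟩ := hd
      have hs : 0 < s ∨ (s = 0 ∧ 100 ≤ p) := hok (p, s) (by simp)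
      have hiff := taskDays_le_iff p s D' hs hD
      simp only [List.map_cons, List.cons_append, popLoop, List.takeWhile_cons,
        List.dropWhile_cons]
      by_cases hc : taskDays p s ≤ D'
      · have h100 : 100 ≤ p + s * D' := hiff.mp hc
        rw [if_pos h100]
        rw [ih (fun x hx => hok x (by simp [hx])) (c + 1)]
        simp [hc]
        omega
      · have h100 : ¬ 100 ≤ p + s * D' := fun h => hc (hiff.mpr h)
        rw [if_neg h100]
        simp [hc]

-- the zipWith of A's for-loop on the shifted state is a further shift
lemma zipWith_shift (l : List (Int × Int)) (extra : List Int) (day D : Int) :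
    List.zipWith (fun pi si => pi + si * day) (l.map (fun x => x.1 + x.2 * D))
        (l.map Prod.snd ++ extra) =
      l.map (fun x => x.1 + x.2 * (D + day)) := by
  induction l with
  | nil => simp
  | cons hd t ih =>
      simp [ih]
      ring

-- the main invariant: A's outer loop on the D-shifted state produces B's groups
lemma main_inv : ∀ (fuel : Nat) (l : List (Int × Int)) (extra : List Int) (D : Int) (ans : List Int),
    (∀ x ∈ l, 0 < x.2 ∨ (x.2 = 0 ∧ 100 ≤ x.1)) → 0 ≤ D → l.length ≤ fuel →
    solutionLoop fuel (l.map (fun x => x.1 + x.2 * D)) (l.map Prod.snd ++ extra) ans =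
      ans ++ groupsLoop (l.map (fun x => taskDays x.1 x.2)) D := by
  intro fuel
  induction fuel with
  | zero =>
      intro l extra D ans _ _ hlen
      have : l = [] := List.eq_nil_of_length_eq_zero (Nat.le_zero.mp hlen)
      subst this
      simp [solutionLoop, groupsLoop]
  | succ f ih =>
      intro l extra D ans hok hD hlen
      match l with
      | [] => simp [solutionLoop, groupsLoop]
      | (p, s) :: rest =>
          have hs : 0 < s ∨ (s = 0 ∧ 100 ≤ p) := hok (p, s) (by simp)
          simp only [List.map_cons, List.cons_append, solutionLoop]
          rw [dayLoop_shift p s D hs hD]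
          set d := taskDays p s with hd
          have hd0 : 0 ≤ d := taskDays_nonneg p s hs
          set day := max 1 (d - D) with hday
          have hzip := zipWith_shift ((p, s) :: rest) extra day D
          simp only [List.map_cons, List.cons_append] at hzip
          rw [hzip]
          set D' := D + day with hD'
          have hDmax : D' = max (D + 1) d := by omega
          have hD'0 : 0 ≤ D' := by omega
          have hpop := popLoop_eq ((p, s) :: rest) extra D' hok hD'0 0
          simp only [List.map_cons, List.cons_append] at hpop
          rw [hpop]
          have hhead : d ≤ D' := by omega
          have hh2 : decide (d ≤ D') = true := decide_eq_true hhead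
          simp only [List.takeWhile_cons, List.dropWhile_cons, ← hd, hh2, if_true]
          have hcnt : (0:Int) < 0 + ((((p, s) :: rest.takeWhile fun x => decide (taskDays x.1 x.2 ≤ D')).length : Nat) : Int) := by
            simp only [List.length_cons]; push_cast; omega
          rw [if_pos hcnt]
          set rest' := rest.dropWhile (fun x => decide (taskDays x.1 x.2 ≤ D')) with hrest'
          rw [ih rest' extra D' _
            (fun x hx => hok x (List.mem_cons_of_mem _ ((rest.dropWhile_sublist _).subset hx)))
            hD'0
            (by
              have h1 : rest'.length ≤ rest.length := List.length_dropWhile_le _ _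
              simp at hlen
              omega)]
          rw [groupsLoop]
          simp only [← hDmax]
          rw [List.takeWhile_map, List.dropWhile_map]
          simp only [Function.comp_def, List.length_map, ← hrest']
          rw [List.append_assoc]
          simp only [List.singleton_append, List.length_cons]
          congr 2
          push_cast
          omega

-- zip bookkeeping for the final assembly
lemma zip_snd_append : ∀ (prog spd : List Int), prog.length ≤ spd.length →
    (prog.zip spd).map Prod.snd ++ spd.drop prog.length = spd := by
  intro prog
  induction prog with
  | nil => intro spd _; simp
  | cons p ps ih =>
      intro spd h
      cases spd with
      | nil => simp at h
      | cons s ss =>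
          simp only [List.zip_cons_cons, List.map_cons, List.cons_append,
            List.length_cons, List.drop_succ_cons]
          rw [ih ss (by simp at h; omega)]

-- ===== VERDICT (by name: the statement is the Claim_ definition above) =====
theorem solution_spec : Claim_equal_solution := by
  intro prog spd _ hpre
  obtain ⟨hlen, hok⟩ := hpre
  unfold Spec_solution solution solution_alt
  have hlz : (prog.zip spd).length = prog.length := by
    simp [List.length_zip]; omega
  have key := main_inv prog.length (prog.zip spd) (spd.drop prog.length) 0 []
    hok (le_refl 0) (by omega)
  have e1 : (prog.zip spd).map (fun x => x.1 + x.2 * 0) = prog := by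
    have h := List.map_fst_zip hlen
    simpa using h
  rw [e1, zip_snd_append prog spd hlen] at key
  simpa using key
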